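-- pv_equiv track=rewrite | github.com/gordonpn/solutions | throttling_gateway.py | dropped_requests
-- ===== SOURCE A (Python) =====
-- from typing import List
--
-- def dropped_requests(request_time: List[int]):
--     dropped = 0
--
--     for i in range(3, len(request_time)):
--         if request_time[i - 3] == request_time[i]:
--             dropped += 1
--         elif i > 19 and request_time[i] - request_time[i - 20] < 10:
--             dropped += 1
--         elif i > 59 and request_time[i] - request_time[i - 60] < 60:
--             dropped += 1
--
--     return dropped
-- ===== SOURCE B (Python) =====
-- from typing import List
--
-- def dropped_requests(request_time):
--     rt = request_time
--     n = len(rt)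
--     repeats = {i for i in range(3, n) if rt[i] == rt[i - 3]}
--     burst10 = {i for i in range(20, n) if rt[i] - rt[i - 20] < 10}
--     burst60 = {i for i in range(60, n) if rt[i] - rt[i - 60] < 60}
--     return len(repeats | burst10 | burst60)
-- ===== Notes on version B (the rewrite author's own statement) =====
-- stated objective: alternative
-- what changed: Replaced A's single stateful pass with a prioritised elif chain by a declarative formulation: build the set of violating indices of each throttling rule independently (set comprehensions, no guards or elif priority) and return the cardinality of their union, which coincides with A's count because every elif branch adds exactly 1.
import Mathlib
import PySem

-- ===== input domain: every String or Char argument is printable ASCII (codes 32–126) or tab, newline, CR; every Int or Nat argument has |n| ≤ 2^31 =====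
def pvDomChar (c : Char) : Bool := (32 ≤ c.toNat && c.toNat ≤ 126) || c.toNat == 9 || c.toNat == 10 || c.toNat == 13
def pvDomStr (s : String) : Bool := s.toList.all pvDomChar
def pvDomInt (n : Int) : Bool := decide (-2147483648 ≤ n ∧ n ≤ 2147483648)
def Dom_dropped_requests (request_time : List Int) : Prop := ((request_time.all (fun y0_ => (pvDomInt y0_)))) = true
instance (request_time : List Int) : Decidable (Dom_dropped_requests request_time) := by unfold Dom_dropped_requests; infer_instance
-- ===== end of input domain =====

-- B replaces A's stateful pass with a prioritised elif chain by a declarative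
-- formulation: the violating-index set of each throttling rule is built
-- independently and the answer is the cardinality of their union; same cost.

-- ===== PORT A =====
-- All Python index accesses A actually evaluates are in range (3 ≤ i < len, and
-- rt[i-20]/rt[i-60] only under the guards i>19/i>59), so pyGetD is exact here.
def dropped_requests (request_time : List Int) : Int :=
  (PySem.List.pyRange 3 (request_time.length : Int) 1).foldl
    (fun dropped i =>
      if PySem.List.pyGetD request_time (i - 3) 0 = PySem.List.pyGetD request_time i 0 then
        dropped + 1
      else if 19 < i ∧ PySem.List.pyGetD request_time i 0 - PySem.List.pyGetD request_time (i - 20) 0 < 10 then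
        dropped + 1
      else if 59 < i ∧ PySem.List.pyGetD request_time i 0 - PySem.List.pyGetD request_time (i - 60) 0 < 60 then
        dropped + 1
      else dropped)
    0

-- ===== PORT B =====
-- transliteration of Source B: three set comprehensions (a Python set comprehension
-- is PySem.Set.ofList of the filtered range), then len of their union.
def dropped_requests_alt (request_time : List Int) : Int :=
  let rt := request_time
  let n : Int := (rt.length : Int)
  let repeats : PySem.Set Int := PySem.Set.ofList ((PySem.List.pyRange 3 n 1).filter
    (fun i => decide (PySem.List.pyGetD rt i 0 = PySem.List.pyGetD rt (i - 3) 0)))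
  let burst10 : PySem.Set Int := PySem.Set.ofList ((PySem.List.pyRange 20 n 1).filter
    (fun i => decide (PySem.List.pyGetD rt i 0 - PySem.List.pyGetD rt (i - 20) 0 < 10)))
  let burst60 : PySem.Set Int := PySem.Set.ofList ((PySem.List.pyRange 60 n 1).filter
    (fun i => decide (PySem.List.pyGetD rt i 0 - PySem.List.pyGetD rt (i - 60) 0 < 60)))
  ((PySem.Set.union (PySem.Set.union repeats burst10) burst60).length : Int)

-- ===== PRECONDITION & SPEC =====
def Spec_dropped_requests (request_time : List Int) (out : Int) : Prop := out = dropped_requests_alt request_time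
instance (request_time : List Int) (out : Int) : Decidable (Spec_dropped_requests request_time out) := by unfold Spec_dropped_requests; infer_instance

-- ===== CLAIM (what is proved, stated in full; the proofs are below) =====
def Claim_equal_dropped_requests : Prop := ∀ (request_time : List Int), Dom_dropped_requests request_time → Spec_dropped_requests request_time (dropped_requests request_time)

-- ===== LEMMAS AND PROOFS =====

-- the per-index drop condition of A's loop, over natural indices
def pvCond (rt : List Int) (i : Nat) : Bool :=
  decide ((rt.getD (i-3) 0 = rt.getD i 0)
    ∨ (19 < i ∧ rt.getD i 0 - rt.getD (i-20) 0 < 10)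
    ∨ (59 < i ∧ rt.getD i 0 - rt.getD (i-60) 0 < 60))

-- the three rule conditions at window start k (the rule fires at index 3+k / 20+k / 60+k)
def pvC1 (rt : List Int) (k : Nat) : Bool := decide (rt.getD k 0 = rt.getD (3+k) 0)
def pvC2 (rt : List Int) (k : Nat) : Bool := decide (rt.getD (20+k) 0 - rt.getD k 0 < 10)
def pvC3 (rt : List Int) (k : Nat) : Bool := decide (rt.getD (60+k) 0 - rt.getD k 0 < 60)

-- the three disjoint counts both programs are reduced to
def pvT1 (rt : List Int) : Nat := (List.range (rt.length - 3)).countP (fun k => pvC1 rt k)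
def pvT2 (rt : List Int) : Nat :=
  (List.range (rt.length - 20)).countP (fun k => pvC2 rt k && !pvC1 rt (17+k))
def pvT3 (rt : List Int) : Nat :=
  (List.range (rt.length - 60)).countP (fun k => pvC3 rt k && !pvC1 rt (57+k) && !pvC2 rt (40+k))

-- an elif-chain where every branch adds 1 is one `if` on the disjunction
lemma pvChain (a b c : Prop) [Decidable a] [Decidable b] [Decidable c] (x y : Int) :
    (if a then x else if b then x else if c then x else y) = if a ∨ b ∨ c then x else y := by
  split_ifs <;> tauto

-- A counts the indices 3 ≤ i < n satisfying pvCond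
lemma pvA_count (rt : List Int) :
    dropped_requests rt
      = ((List.range (rt.length - 3)).countP (fun k => pvCond rt (3+k)) : Int) := by
  unfold dropped_requests
  rw [PySem.List.pyRange_one, List.foldl_map]
  have hb : (fun (d : Int) (k : Nat) =>
      if PySem.List.pyGetD rt ((3:Int) + k - 3) 0 = PySem.List.pyGetD rt ((3:Int)+k) 0 then d + 1
      else if 19 < (3:Int)+k ∧ PySem.List.pyGetD rt ((3:Int)+k) 0 - PySem.List.pyGetD rt ((3:Int)+k - 20) 0 < 10 then d + 1
      else if 59 < (3:Int)+k ∧ PySem.List.pyGetD rt ((3:Int)+k) 0 - PySem.List.pyGetD rt ((3:Int)+k - 60) 0 < 60 then d + 1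
      else d)
    = (fun d k => if (fun k => pvCond rt (3+k)) k = true then d + 1 else d) := by
    funext d k
    simp only [pvCond, decide_eq_true_eq]
    have h3 : (((3+k:Nat):Int) - 3) = ((k : Nat) : Int) := by push_cast; ring
    have hi : ((3:Int) + k) = (((3+k : Nat) : Int)) := by push_cast; ring
    have hg : (3+k)-3 = k := by omega
    have e2 : (19 < ((3+k:Nat):Int)) ↔ (19 < 3+k) := by exact_mod_cast Iff.rfl
    have e3 : (59 < ((3+k:Nat):Int)) ↔ (59 < 3+k) := by exact_mod_cast Iff.rfl
    simp only [hi, h3, PySem.List.pyGetD_natCast, hg, e2, e3]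
    rw [pvChain]
    refine if_congr ?_ rfl rfl
    by_cases h20 : 17 ≤ k
    · have h20' : (((3+k:Nat):Int) - 20) = (((3+k-20 : Nat)):Int) := by push_cast [h20]; omega
      simp only [h20', PySem.List.pyGetD_natCast]
      by_cases h60 : 57 ≤ k
      · have h60' : (((3+k:Nat):Int) - 60) = (((3+k-60 : Nat)):Int) := by push_cast [h60]; omega
        simp only [h60', PySem.List.pyGetD_natCast]
      · have g2 : ¬ (59 < 3+k) := by omega
        tauto
    · have g1 : ¬ (19 < 3+k) := by omega
      have g2 : ¬ (59 < 3+k) := by omega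
      tauto
  rw [hb, PySem.List.foldl_count_if]
  have hlen : ((rt.length : Int) - 3).toNat = rt.length - 3 := by omega
  rw [hlen]
  simp

-- a pointwise partition of one predicate into three disjoint ones splits the count
lemma pvCountP_partition {α : Type} (p q r s : α → Bool)
    (h : ∀ x, (if p x then (1:Nat) else 0)
      = (if q x then 1 else 0) + (if r x then 1 else 0) + (if s x then 1 else 0))
    (l : List α) : l.countP p = l.countP q + l.countP r + l.countP s := by
  induction l with
  | nil => simp
  | cons x xs ih =>
    simp only [List.countP_cons, ih]
    have := h x
    split_ifs at this ⊢ <;> omega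

-- a count over [3, n) whose predicate is guarded by c ≤ i is a count over [c, n)
lemma pvShift (m c : Nat) (hc : 3 ≤ c) (X Y : Nat → Bool) (hXY : ∀ k, X (c+k) = Y k) :
    (List.range (m - 3)).countP (fun k => decide (c ≤ 3+k) && X (3+k))
      = (List.range (m - c)).countP Y := by
  have hsplit : m - 3 = min (c-3) (m-3) + (m - c) := by omega
  rw [hsplit, List.range_add, List.countP_append, List.countP_map]
  have h1 : (List.range (min (c-3) (m-3))).countP (fun k => decide (c ≤ 3+k) && X (3+k)) = 0 := by
    rw [List.countP_eq_zero]
    intro k hk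
    simp only [List.mem_range] at hk
    simp only [Bool.and_eq_true, decide_eq_true_eq, not_and]
    intro hle
    omega
  rw [h1, Nat.zero_add]
  apply List.countP_congr
  intro k hk
  simp only [List.mem_range] at hk
  have ha : min (c-3) (m-3) = c - 3 := by omega
  simp only [Function.comp_apply, ha]
  rw [show 3 + (c - 3 + k) = c + k from by omega, hXY k]
  simp [show c ≤ c + k from by omega]

-- A's count splits into the three disjoint rule counts
lemma pvA_eq (rt : List Int) :
    dropped_requests rt = ((pvT1 rt + pvT2 rt + pvT3 rt : Nat) : Int) := by
  rw [pvA_count]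
  congr 1
  have hpart : (List.range (rt.length - 3)).countP (fun k => pvCond rt (3+k))
      = (List.range (rt.length - 3)).countP (fun k => pvC1 rt k)
        + (List.range (rt.length - 3)).countP
            (fun k => decide (20 ≤ 3+k) && (pvC2 rt (3+k-20) && !pvC1 rt (3+k-3)))
        + (List.range (rt.length - 3)).countP
            (fun k => decide (60 ≤ 3+k) && (pvC3 rt (3+k-60) && !pvC1 rt (3+k-3) && !pvC2 rt (3+k-20))) := by
    apply pvCountP_partition
    intro k
    simp only [pvCond, pvC1, pvC2, pvC3, show (3+k)-3 = k from by omega]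
    by_cases h17 : 17 ≤ k
    · by_cases h57 : 57 ≤ k
      · rw [show 20 + (3+k-20) = 3+k from by omega, show 60 + (3+k-60) = 3+k from by omega]
        by_cases hc1 : rt[k]?.getD 0 = rt[3+k]?.getD 0 <;>
          by_cases hc2 : rt[3+k]?.getD 0 - rt[3+k-20]?.getD 0 < 10 <;>
          by_cases hc3 : rt[3+k]?.getD 0 - rt[3+k-60]?.getD 0 < 60 <;>
          simp [hc1, hc2, hc3, show (19:Nat) < 3+k from by omega, show (59:Nat) < 3+k from by omega,
            show (20:Nat) ≤ 3+k from by omega, show (60:Nat) ≤ 3+k from by omega]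
      · rw [show 20 + (3+k-20) = 3+k from by omega]
        by_cases hc1 : rt[k]?.getD 0 = rt[3+k]?.getD 0 <;>
          by_cases hc2 : rt[3+k]?.getD 0 - rt[3+k-20]?.getD 0 < 10 <;>
          simp [hc1, hc2, show (19:Nat) < 3+k from by omega, show ¬((59:Nat) < 3+k) from by omega,
            show (20:Nat) ≤ 3+k from by omega, show ¬((60:Nat) ≤ 3+k) from by omega]
    · by_cases hc1 : rt[k]?.getD 0 = rt[3+k]?.getD 0 <;>
        simp [hc1, show ¬((19:Nat) < 3+k) from by omega, show ¬((59:Nat) < 3+k) from by omega,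
          show ¬((20:Nat) ≤ 3+k) from by omega, show ¬((60:Nat) ≤ 3+k) from by omega]
  rw [hpart]
  have e2 : (List.range (rt.length - 3)).countP
        (fun k => decide (20 ≤ 3+k) && (pvC2 rt (3+k-20) && !pvC1 rt (3+k-3)))
      = pvT2 rt := by
    exact pvShift rt.length 20 (by omega)
      (fun j => pvC2 rt (j-20) && !pvC1 rt (j-3))
      (fun k => pvC2 rt k && !pvC1 rt (17+k))
      (fun k => by simp only []; rw [show 20+k-20 = k from by omega, show 20+k-3 = 17+k from by omega])
  have e3 : (List.range (rt.length - 3)).countP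
        (fun k => decide (60 ≤ 3+k) && (pvC3 rt (3+k-60) && !pvC1 rt (3+k-3) && !pvC2 rt (3+k-20)))
      = pvT3 rt := by
    exact pvShift rt.length 60 (by omega)
      (fun j => pvC3 rt (j-60) && !pvC1 rt (j-3) && !pvC2 rt (j-20))
      (fun k => pvC3 rt k && !pvC1 rt (57+k) && !pvC2 rt (40+k))
      (fun k => by simp only []; rw [show 60+k-60 = k from by omega, show 60+k-3 = 57+k from by omega,
        show 60+k-20 = 40+k from by omega])
  rw [e2, e3]
  rfl

-- B's three filtered ranges, in mapped-Nat-range form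
def pvL (rt : List Int) (c : Nat) (P : Nat → Bool) : List Int :=
  ((List.range (rt.length - c)).filter P).map (fun k => ((c+k : Nat) : Int))

lemma pvL_nodup (rt : List Int) (c : Nat) (P : Nat → Bool) : (pvL rt c P).Nodup := by
  apply List.Nodup.map
  · intro a b h
    simp only [] at h
    omega
  · exact (List.nodup_range).filter _

lemma pvL_mem (rt : List Int) (c : Nat) (P : Nat → Bool) (x : Int) :
    x ∈ pvL rt c P ↔ ∃ k, k < rt.length - c ∧ P k = true ∧ x = ((c+k : Nat) : Int) := by
  simp only [pvL, List.mem_map, List.mem_filter, List.mem_range]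
  constructor
  · rintro ⟨k, ⟨hk, hp⟩, rfl⟩
    exact ⟨k, hk, hp, rfl⟩
  · rintro ⟨k, hk, hp, rfl⟩
    exact ⟨k, ⟨hk, hp⟩, rfl⟩

lemma pvL_length (rt : List Int) (c : Nat) (P : Nat → Bool) :
    (pvL rt c P).length = (List.range (rt.length - c)).countP P := by
  simp only [pvL, List.length_map]
  exact List.countP_eq_length_filter.symm

-- B's Python filter over pyRange c n equals pvL at the matching Nat predicate
lemma pvFilter_eq (rt : List Int) (ci : Int) (c : Nat) (hci : ci = (c : Int))
    (p : Int → Bool) (P : Nat → Bool)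
    (hpP : ∀ k : Nat, p ((c+k : Nat) : Int) = P k) :
    (PySem.List.pyRange ci (rt.length : Int) 1).filter p = pvL rt c P := by
  subst hci
  rw [PySem.List.pyRange_one]
  have hlen : (((rt.length : Int)) - (c:Int)).toNat = rt.length - c := by omega
  rw [hlen, List.filter_map]
  unfold pvL
  congr 1
  · apply List.filter_congr
    intro k _
    simp only [Function.comp_apply]
    rw [show ((c:Int) + (k:Nat)) = (((c+k : Nat)) : Int) from by push_cast; ring, hpP]

-- counting over one of B's comprehension sets is counting over its Nat range
lemma pvCountP_pvL (rt : List Int) (c : Nat) (P : Nat → Bool) (q : Int → Bool) :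
    (pvL rt c P).countP q
      = (List.range (rt.length - c)).countP (fun k => q ((c+k : Nat) : Int) && P k) := by
  unfold pvL
  rw [List.countP_map, List.countP_filter]
  apply List.countP_congr
  intro k _
  rfl

-- B equals the same three disjoint rule counts
lemma pvB_eq (rt : List Int) :
    dropped_requests_alt rt = ((pvT1 rt + pvT2 rt + pvT3 rt : Nat) : Int) := by
  unfold dropped_requests_alt
  simp only []
  rw [pvFilter_eq rt 3 3 (by norm_num) _ (fun k => decide (rt.getD (3+k) 0 = rt.getD k 0))
      (fun k => by
        simp only [PySem.List.pyGetD_natCast,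
          show (((3+k:Nat):Int) - 3) = ((k:Nat):Int) from by push_cast; ring,
          PySem.List.pyGetD_natCast]),
    pvFilter_eq rt 20 20 (by norm_num) _ (fun k => pvC2 rt k)
      (fun k => by
        simp only [pvC2, PySem.List.pyGetD_natCast,
          show (((20+k:Nat):Int) - 20) = ((k:Nat):Int) from by push_cast; ring,
          PySem.List.pyGetD_natCast]),
    pvFilter_eq rt 60 60 (by norm_num) _ (fun k => pvC3 rt k)
      (fun k => by
        simp only [pvC3, PySem.List.pyGetD_natCast,
          show (((60+k:Nat):Int) - 60) = ((k:Nat):Int) from by push_cast; ring,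
          PySem.List.pyGetD_natCast])]
  set P1 : Nat → Bool := fun k => decide (rt.getD (3+k) 0 = rt.getD k 0) with hP1
  have hL1 : PySem.Set.ofList (pvL rt 3 P1) = pvL rt 3 P1 :=
    PySem.Set.ofList_eq_self_of_nodup _ (pvL_nodup rt 3 P1)
  have hL2 : PySem.Set.ofList (pvL rt 20 (fun k => pvC2 rt k)) = pvL rt 20 (fun k => pvC2 rt k) :=
    PySem.Set.ofList_eq_self_of_nodup _ (pvL_nodup rt 20 _)
  have hL3 : PySem.Set.ofList (pvL rt 60 (fun k => pvC3 rt k)) = pvL rt 60 (fun k => pvC3 rt k) :=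
    PySem.Set.ofList_eq_self_of_nodup _ (pvL_nodup rt 60 _)
  rw [hL1, hL2, hL3]
  show (((PySem.Set.union (PySem.Set.union (pvL rt 3 P1) (pvL rt 20 (fun k => pvC2 rt k)))
      (pvL rt 60 (fun k => pvC3 rt k))).length : Nat) : Int) = _
  rw [show (PySem.Set.union (PySem.Set.union (pvL rt 3 P1) (pvL rt 20 (fun k => pvC2 rt k)))
      (pvL rt 60 (fun k => pvC3 rt k)))
    = PySem.Set.update (PySem.Set.update (pvL rt 3 P1) (pvL rt 20 (fun k => pvC2 rt k)))
      (pvL rt 60 (fun k => pvC3 rt k)) from rfl]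
  rw [PySem.Set.update_eq_append_filter (PySem.Set.update (pvL rt 3 P1) (pvL rt 20 (fun k => pvC2 rt k))),
      PySem.Set.update_eq_append_filter (pvL rt 3 P1)]
  rw [hL2, hL3]
  simp only [List.length_append]
  have hP1C1 : ∀ j, P1 j = pvC1 rt j := by
    intro j
    simp only [hP1, pvC1]
    exact decide_eq_decide.mpr eq_comm
  have h1 : (pvL rt 3 P1).length = pvT1 rt := by
    rw [pvL_length]
    unfold pvT1
    apply List.countP_congr
    intro k _
    rw [hP1C1]
  have h2 : (List.filter (fun y => !(pvL rt 3 P1).contains y)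
        (pvL rt 20 (fun k => pvC2 rt k))).length = pvT2 rt := by
    rw [← List.countP_eq_length_filter, pvCountP_pvL]
    unfold pvT2
    apply List.countP_congr
    intro k hk
    simp only [List.mem_range] at hk
    have hcont : ((pvL rt 3 P1).contains ((20+k : Nat) : Int)) = P1 (17+k) := by
      apply Bool.eq_iff_iff.mpr
      rw [List.contains_iff_mem, pvL_mem]
      constructor
      · rintro ⟨j, hj, hPj, hx⟩
        have hjk : j = 17+k := by omega
        rwa [hjk] at hPj
      · intro h
        exact ⟨17+k, by omega, h, by push_cast; ring⟩
    simp only [hcont, hP1C1]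
    rw [Bool.and_comm]
  have h3 : (List.filter
        (fun y => !(pvL rt 3 P1 ++ List.filter (fun y => !(pvL rt 3 P1).contains y)
            (pvL rt 20 (fun k => pvC2 rt k))).contains y)
        (pvL rt 60 (fun k => pvC3 rt k))).length = pvT3 rt := by
    rw [← List.countP_eq_length_filter, pvCountP_pvL]
    unfold pvT3
    apply List.countP_congr
    intro k hk
    simp only [List.mem_range] at hk
    have hcont : ((pvL rt 3 P1 ++ List.filter (fun y => !(pvL rt 3 P1).contains y)
          (pvL rt 20 (fun k => pvC2 rt k))).contains ((60+k : Nat) : Int))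
        = (P1 (57+k) || pvC2 rt (40+k)) := by
      apply Bool.eq_iff_iff.mpr
      rw [List.contains_iff_mem]
      simp only [List.mem_append, List.mem_filter, pvL_mem, Bool.or_eq_true]
      constructor
      · rintro (⟨j, hj, hPj, hx⟩ | ⟨⟨j, hj, hPj, hx⟩, _⟩)
        · have hjk : j = 57+k := by omega
          rw [hjk] at hPj
          exact Or.inl hPj
        · have hjk : j = 40+k := by omega
          rw [hjk] at hPj
          exact Or.inr hPj
      · rintro (h | h)
        · exact Or.inl ⟨57+k, by omega, h, by push_cast; ring⟩
        · by_cases hmem : ((60+k : Nat) : Int) ∈ pvL rt 3 P1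
          · exact Or.inl (by rwa [pvL_mem] at hmem)
          · refine Or.inr ⟨⟨40+k, by omega, h, by push_cast; ring⟩, ?_⟩
            simp only [Bool.not_eq_true', ← Bool.not_eq_true, List.contains_iff_mem]
            simpa using hmem
    simp only [hcont, hP1C1]
    generalize pvC1 rt (57+k) = a
    generalize pvC2 rt (40+k) = b
    generalize pvC3 rt k = c
    cases a <;> cases b <;> cases c <;> rfl
  simp only [PySem.Set.contains_eq_listContains]
  rw [h1, h2, h3]

-- ===== VERDICT (by name: the statement is the Claim_ definition above) =====
theorem dropped_requests_spec : Claim_equal_dropped_requests := by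
  intro rt _
  unfold Spec_dropped_requests
  rw [pvA_eq, pvB_eq]
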